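-- pv_equiv track=rewrite | github.com/elkhaligy/LeetCode | 2. Medium/(6) Jun 2024/Week 3/1482. Minimum Number of Days.py | minDays_bruteforce
-- ===== SOURCE A (Python) =====
-- def minDays_bruteforce(bloomDay: list[int], m: int, k: int) -> int:
--     n = len(bloomDay)
--     if m * k > n:
--         return -1
--
--     sorted_bloomDay = sorted(bloomDay)
--     sorted_unq_bloomDay = []
--     temp_set = set()
--
--     for day in sorted_bloomDay:
--         if day not in temp_set:
--             sorted_unq_bloomDay.append(day)
--         temp_set.add(day)
--
--     answer = float('inf')
--
--     for day in sorted_unq_bloomDay: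
--         bouq_num = get_bouq_num(bloomDay, day, k)
--
--         if bouq_num >= m:
--             answer = min(answer, day)
--
--     return -1 if answer == float('inf') else answer
--
-- def get_bouq_num(bloomDay: list[int], mid: int, k: int) -> int:
--     conseq_flowers = 0
--     bouq_num = 0
--
--     for day in bloomDay:
--         if day <= mid:
--             conseq_flowers += 1
--         else:
--             conseq_flowers = 0
--         if conseq_flowers == k:
--             bouq_num += 1
--             conseq_flowers = 0
--
--     return bouq_num
-- ===== SOURCE B (Python) =====
-- def minDays_bruteforce(bloomDay: list[int], m: int, k: int) -> int:
--     n = len(bloomDay)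
--     if m * k > n:
--         return -1
--     days = sorted(set(bloomDay))
--     lo, hi = 0, len(days)
--     while lo < hi:
--         mid = (lo + hi) // 2
--         if can_make(bloomDay, days[mid], m, k):
--             hi = mid
--         else:
--             lo = mid + 1
--     return days[lo] if lo < len(days) else -1
--
--
-- def can_make(bloomDay: list[int], day: int, m: int, k: int) -> bool:
--     bouquets = 0
--     run = 0
--     for d in bloomDay:
--         if d <= day:
--             run += 1
--         else:
--             bouquets += run // k
--             run = 0
--     bouquets += run // k
--     return bouquets >= m
-- ===== Notes on version B (the rewrite author's own statement) =====
-- stated objective: alternative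
-- what changed: Replaces A's linear scan over every distinct day (recounting bouquets for each) by a binary search on the sorted distinct days using the monotone feasibility check, with the bouquet count computed per maximal run via floor division.
-- outside the precondition, e.g. on minDays_bruteforce([1, 1], -1, -1): A returns 1, B returns -1; on minDays_bruteforce([3, 1], 1, 0): A returns 1, B raises ZeroDivisionError
import Mathlib
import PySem

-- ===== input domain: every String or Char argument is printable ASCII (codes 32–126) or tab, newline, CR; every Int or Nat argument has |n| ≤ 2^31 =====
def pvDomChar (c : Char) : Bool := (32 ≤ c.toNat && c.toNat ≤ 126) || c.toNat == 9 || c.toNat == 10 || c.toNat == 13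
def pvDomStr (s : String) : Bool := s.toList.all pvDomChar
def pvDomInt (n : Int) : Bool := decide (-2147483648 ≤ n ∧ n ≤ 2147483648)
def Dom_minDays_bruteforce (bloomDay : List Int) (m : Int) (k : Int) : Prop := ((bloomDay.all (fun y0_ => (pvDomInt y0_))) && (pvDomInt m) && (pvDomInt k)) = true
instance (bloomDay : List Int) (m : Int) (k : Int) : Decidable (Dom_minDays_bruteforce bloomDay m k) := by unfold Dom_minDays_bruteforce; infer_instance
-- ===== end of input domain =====

-- B replaces A's scan over all distinct days by a binary search on the sorted distinct
-- days (feasibility is monotone in the day for k ≥ 1), with the bouquet count taken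
-- per maximal run via floor division: objective = alternative algorithm.

-- ===== PORT A =====
def getBouqNum (bloomDay : List Int) (mid : Int) (k : Int) : Int :=
  (bloomDay.foldl (fun (st : Int × Int) day =>
      let c := if day ≤ mid then st.1 + 1 else 0
      if c = k then (0, st.2 + 1) else (c, st.2)) (0, 0)).2

-- A's float('inf') sentinel is ported as Option Int (none = the sentinel): exact here,
-- since every other value compared with it is an Int and inf is greater than (and ≠) all of them.
def minDays_bruteforce (bloomDay : List Int) (m : Int) (k : Int) : Int :=
  let n : Int := bloomDay.length
  if m * k > n then -1
  else
    let sortedBloomDay := PySem.List.sorted bloomDay (fun x => x) false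
    let p := sortedBloomDay.foldl
      (fun (p : List Int × PySem.Set Int) day =>
        ((if PySem.Set.contains p.2 day then p.1 else p.1 ++ [day]), PySem.Set.add p.2 day))
      ([], PySem.Set.empty)
    let answer := p.1.foldl
      (fun (answer : Option Int) day =>
        if getBouqNum bloomDay day k ≥ m then
          some (match answer with | none => day | some a => min a day)
        else answer) none
    match answer with
    | none => -1
    | some a => a

-- ===== PORT B =====
def canMake (bloomDay : List Int) (day : Int) (m : Int) (k : Int) : Bool :=
  let st := bloomDay.foldl
    (fun (st : Int × Int) d =>
      if d ≤ day then (st.1, st.2 + 1)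
      else (st.1 + PySem.Int.floordiv st.2 k, 0)) (0, 0)
  decide (st.1 + PySem.Int.floordiv st.2 k ≥ m)

-- the while-loop of Source B (fuel = an upper bound on the iteration count, a totality device only;
-- days[mid] is in range on every reachable state 0 ≤ lo ≤ mid < hi ≤ len days, so pyGetD is exact here)
def bsLoop (bloomDay : List Int) (days : List Int) (m : Int) (k : Int) : Nat → Int → Int → Int
  | 0, lo, _ => lo
  | fuel + 1, lo, hi =>
    if lo < hi then
      let mid := PySem.Int.floordiv (lo + hi) 2
      if canMake bloomDay (PySem.List.pyGetD days mid 0) m k then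
        bsLoop bloomDay days m k fuel lo mid
      else
        bsLoop bloomDay days m k fuel (mid + 1) hi
    else lo

def minDays_bruteforce_alt (bloomDay : List Int) (m : Int) (k : Int) : Int :=
  let n : Int := bloomDay.length
  if m * k > n then -1
  else
    let days := PySem.List.sorted (PySem.Set.ofList bloomDay) (fun x => x) false
    let lo := bsLoop bloomDay days m k days.length 0 (days.length : Int)
    if lo < (days.length : Int) then PySem.List.pyGetD days lo 0 else -1

-- ===== PRECONDITION & SPEC =====
-- Pre_ restricts to the problem's natural domain of positive bouquet sizes k ≥ 1;
-- for k = 0 B's floor division raises ZeroDivisionError, and k < 0 is outside the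
-- natural domain (A's values there are artefacts of its `== k` test never/degenerately firing).
def Pre_minDays_bruteforce (bloomDay : List Int) (m : Int) (k : Int) : Prop := 1 ≤ k
instance (bloomDay : List Int) (m : Int) (k : Int) : Decidable (Pre_minDays_bruteforce bloomDay m k) := by unfold Pre_minDays_bruteforce; infer_instance
def pvWitness_minDays_bruteforce : List Int × Int × Int := ([1, 10, 3, 10, 2], 3, 1)

def Spec_minDays_bruteforce (bloomDay : List Int) (m : Int) (k : Int) (out : Int) : Prop := out = minDays_bruteforce_alt bloomDay m k
instance (bloomDay : List Int) (m : Int) (k : Int) (out : Int) : Decidable (Spec_minDays_bruteforce bloomDay m k out) := by unfold Spec_minDays_bruteforce; infer_instance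

-- ===== CLAIM (what is proved, stated in full; the proofs are below) =====
def Claim_equal_minDays_bruteforce : Prop := ∀ (bloomDay : List Int) (m : Int) (k : Int), Dom_minDays_bruteforce bloomDay m k → Pre_minDays_bruteforce bloomDay m k → Spec_minDays_bruteforce bloomDay m k (minDays_bruteforce bloomDay m k)

-- ===== LEMMAS AND PROOFS =====

-- division-step arithmetic: incrementing a nonnegative run updates (run % k, run / k) the way A's counter does
lemma run_succ_emod (r k : Int) (hk : 0 < k) (hr : 0 ≤ r) (hc : r % k + 1 = k) :
    (r + 1) % k = 0 ∧ (r + 1) / k = r / k + 1 := by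
  have h := Int.ediv_add_emod r k
  have h1 : r + 1 = k * (r / k + 1) := by ring_nf; omega
  rw [h1]
  constructor
  · exact Int.mul_emod_right _ _
  · exact Int.mul_ediv_cancel_left _ (by omega)

lemma run_succ_emod' (r k : Int) (hk : 0 < k) (hr : 0 ≤ r) (hc : ¬ r % k + 1 = k) :
    (r + 1) % k = r % k + 1 ∧ (r + 1) / k = r / k := by
  have h := Int.ediv_add_emod r k
  have h2 := Int.emod_nonneg r (show k ≠ 0 by omega)
  have h3 := Int.emod_lt_of_pos r hk
  have h1 : r + 1 = (r % k + 1) + (r / k) * k := by rw [mul_comm]; omega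
  rw [h1]
  constructor
  · rw [Int.add_mul_emod_self_right _ _ _, Int.emod_eq_of_lt (by omega) (by omega)]
  · rw [Int.add_mul_ediv_right _ _ (show k ≠ 0 by omega),
        Int.ediv_eq_zero_of_lt (by omega) (by omega)]
    omega

-- A's streaming counter started at (r % k, bq + r / k) computes B's "bouquets + run / k"
lemma countAB_aux (day k : Int) (hk : 1 ≤ k) :
    ∀ (l : List Int) (r bq : Int), 0 ≤ r →
      (l.foldl (fun (st : Int × Int) d =>
          let c := if d ≤ day then st.1 + 1 else 0
          if c = k then (0, st.2 + 1) else (c, st.2)) (r % k, bq + r / k)).2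
      = (l.foldl (fun (st : Int × Int) d =>
            if d ≤ day then (st.1, st.2 + 1) else (st.1 + st.2 / k, 0)) (bq, r)).1
        + (l.foldl (fun (st : Int × Int) d =>
            if d ≤ day then (st.1, st.2 + 1) else (st.1 + st.2 / k, 0)) (bq, r)).2 / k
  | [], r, bq, hr => by simp
  | d :: l, r, bq, hr => by
    simp only [List.foldl_cons]
    by_cases hd : d ≤ day
    · by_cases hc : r % k + 1 = k
      · have h := run_succ_emod r k (by omega) hr hc
        have : ((if (if d ≤ day then r % k + 1 else 0) = k then (0, bq + r / k + 1)
                  else ((if d ≤ day then r % k + 1 else 0), bq + r / k)) : Int × Int)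
              = ((r + 1) % k, bq + (r + 1) / k) := by
          rw [if_pos hd, if_pos hc, h.1, h.2]; ring_nf
        rw [this, if_pos hd]
        exact countAB_aux day k hk l (r + 1) bq (by omega)
      · have h := run_succ_emod' r k (by omega) hr hc
        have : ((if (if d ≤ day then r % k + 1 else 0) = k then (0, bq + r / k + 1)
                  else ((if d ≤ day then r % k + 1 else 0), bq + r / k)) : Int × Int)
              = ((r + 1) % k, bq + (r + 1) / k) := by
          rw [if_pos hd, if_neg hc, h.1, h.2]
        rw [this, if_pos hd]
        exact countAB_aux day k hk l (r + 1) bq (by omega)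
    · have : ((if (if d ≤ day then r % k + 1 else 0) = k then (0, bq + r / k + 1)
                else ((if d ≤ day then r % k + 1 else 0), bq + r / k)) : Int × Int)
            = ((0 : Int) % k, (bq + r / k) + (0 : Int) / k) := by
        rw [if_neg hd, if_neg (by omega)]
        simp
      rw [this, if_neg hd]
      exact countAB_aux day k hk l 0 (bq + r / k) le_rfl

-- B's feasibility test decides exactly "A's bouquet count reaches m"
lemma canMake_eq (bloomDay : List Int) (day m k : Int) (hk : 1 ≤ k) :
    canMake bloomDay day m k = decide (getBouqNum bloomDay day k ≥ m) := by
  unfold canMake getBouqNum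
  simp only [PySem.Int.floordiv_eq_ediv_of_pos (show (0:Int) < k by omega)]
  have h := countAB_aux day k hk bloomDay 0 0 le_rfl
  simp only [Int.zero_emod, Int.zero_ediv, add_zero] at h
  rw [h]

-- ===== VERDICT (by name: the statement is the Claim_ definition above) =====
-- feasibility is monotone in the day: the streaming-counter invariant
lemma bouq_mono_aux (k d1 d2 : Int) (hk : 1 ≤ k) (hd : d1 ≤ d2) :
    ∀ (l : List Int) (c1 b1 c2 b2 : Int),
      0 ≤ c1 → c1 < k → 0 ≤ c2 → c2 < k → b1 ≤ b2 → (c1 ≤ c2 ∨ b1 < b2) →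
      (l.foldl (fun (st : Int × Int) day =>
          let c := if day ≤ d1 then st.1 + 1 else 0
          if c = k then (0, st.2 + 1) else (c, st.2)) (c1, b1)).2
      ≤ (l.foldl (fun (st : Int × Int) day =>
          let c := if day ≤ d2 then st.1 + 1 else 0
          if c = k then (0, st.2 + 1) else (c, st.2)) (c2, b2)).2
  | [], c1, b1, c2, b2, h1, h2, h3, h4, h5, h6 => by simpa using h5
  | d :: l, c1, b1, c2, b2, h1, h2, h3, h4, h5, h6 => by
    simp only [List.foldl_cons]
    by_cases ha : d ≤ d1
    · have hb : d ≤ d2 := le_trans ha hd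
      simp only [if_pos ha, if_pos hb]
      by_cases e1 : c1 + 1 = k <;> by_cases e2 : c2 + 1 = k
      · rw [if_pos e1, if_pos e2]
        exact bouq_mono_aux k d1 d2 hk hd l 0 (b1+1) 0 (b2+1)
          le_rfl (by omega) le_rfl (by omega) (by omega) (by omega)
      · rw [if_pos e1, if_neg e2]
        exact bouq_mono_aux k d1 d2 hk hd l 0 (b1+1) (c2+1) b2
          le_rfl (by omega) (by omega) (by omega) (by omega) (by omega)
      · rw [if_neg e1, if_pos e2]
        exact bouq_mono_aux k d1 d2 hk hd l (c1+1) b1 0 (b2+1)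
          (by omega) (by omega) le_rfl (by omega) (by omega) (by omega)
      · rw [if_neg e1, if_neg e2]
        exact bouq_mono_aux k d1 d2 hk hd l (c1+1) b1 (c2+1) b2
          (by omega) (by omega) (by omega) (by omega) (by omega) (by omega)
    · by_cases hb : d ≤ d2
      · simp only [if_neg ha, if_pos hb, if_neg (show ¬ (0:Int) = k by omega)]
        by_cases e2 : c2 + 1 = k
        · rw [if_pos e2]
          exact bouq_mono_aux k d1 d2 hk hd l 0 b1 0 (b2+1)
            le_rfl (by omega) le_rfl (by omega) (by omega) (by omega)
        · rw [if_neg e2]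
          exact bouq_mono_aux k d1 d2 hk hd l 0 b1 (c2+1) b2
            le_rfl (by omega) (by omega) (by omega) (by omega) (by omega)
      · simp only [if_neg ha, if_neg hb, if_neg (show ¬ (0:Int) = k by omega)]
        exact bouq_mono_aux k d1 d2 hk hd l 0 b1 0 b2
          le_rfl (by omega) le_rfl (by omega) (by omega) (by omega)

lemma bouq_mono (bloomDay : List Int) (k d1 d2 : Int) (hk : 1 ≤ k) (hd : d1 ≤ d2) :
    getBouqNum bloomDay d1 k ≤ getBouqNum bloomDay d2 k := by
  unfold getBouqNum
  exact bouq_mono_aux k d1 d2 hk hd bloomDay 0 0 0 0 le_rfl (by omega) le_rfl (by omega)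
    le_rfl (Or.inl le_rfl)

-- A's min-accumulator over a strictly increasing list picks the FIRST feasible day
lemma foldMin_stay (bloomDay : List Int) (m k : Int) :
    ∀ (l : List Int) (a : Int), (∀ x ∈ l, a ≤ x) →
      (l.foldl (fun (answer : Option Int) day =>
          if getBouqNum bloomDay day k ≥ m then
            some (match answer with | none => day | some b => min b day)
          else answer) (some a)) = some a
  | [], a, _ => rfl
  | d :: l, a, h => by
    simp only [List.foldl_cons]
    have had : min a d = a := min_eq_left (h d List.mem_cons_self)
    by_cases hp : getBouqNum bloomDay d k ≥ m
    · rw [if_pos hp]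
      simpa [had] using foldMin_stay bloomDay m k l a (fun x hx => h x (List.mem_cons_of_mem _ hx))
    · rw [if_neg hp]
      exact foldMin_stay bloomDay m k l a (fun x hx => h x (List.mem_cons_of_mem _ hx))

lemma foldMin_find (bloomDay : List Int) (m k : Int) :
    ∀ (l : List Int), l.Pairwise (· < ·) →
      (l.foldl (fun (answer : Option Int) day =>
          if getBouqNum bloomDay day k ≥ m then
            some (match answer with | none => day | some b => min b day)
          else answer) none)
      = l.find? (fun day => decide (getBouqNum bloomDay day k ≥ m))
  | [], _ => rfl
  | d :: l, hp => by
    simp only [List.foldl_cons, List.find?_cons]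
    by_cases hd : getBouqNum bloomDay d k ≥ m
    · rw [if_pos hd]
      have : (decide (getBouqNum bloomDay d k ≥ m)) = true := by simpa using hd
      rw [this]
      exact foldMin_stay bloomDay m k l d
        (fun x hx => le_of_lt ((List.pairwise_cons.mp hp).1 x hx))
    · rw [if_neg hd]
      have : (decide (getBouqNum bloomDay d k ≥ m)) = false := by simpa using hd
      rw [this]
      exact foldMin_find bloomDay m k l (List.pairwise_cons.mp hp).2

-- A's dedup loop keeps its list and its set identical (both are foldl Set.add)
lemma dedup_fold :
    ∀ (l : List Int) (acc : PySem.Set Int),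
      (l.foldl (fun (p : List Int × PySem.Set Int) day =>
          ((if PySem.Set.contains p.2 day then p.1 else p.1 ++ [day]), PySem.Set.add p.2 day))
        (acc, acc))
      = (l.foldl PySem.Set.add acc, l.foldl PySem.Set.add acc)
  | [], acc => rfl
  | d :: l, acc => by
    simp only [List.foldl_cons]
    have : ((if PySem.Set.contains acc d then acc else acc ++ [d]) : List Int)
         = PySem.Set.add acc d := rfl
    rw [this]
    exact dedup_fold l (PySem.Set.add acc d)

-- ofList of a ≤-sorted list is strictly increasing
lemma ofList_sublist : ∀ (xs : List Int), (PySem.Set.ofList xs).Sublist xs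
  | [] => List.Sublist.refl []
  | x :: xs => by
    rw [PySem.Set.ofList_cons]
    refine List.Sublist.cons₂ x (List.Sublist.trans ?_ (ofList_sublist xs))
    simp only [PySem.Set.discard]
    exact List.filter_sublist

lemma ofList_pairwise_lt (xs : List Int) (h : xs.Pairwise (· ≤ ·)) :
    (PySem.Set.ofList xs).Pairwise (· < ·) := by
  have hle := List.Pairwise.sublist (ofList_sublist xs) h
  have hnd : (PySem.Set.ofList xs).Nodup := PySem.Set.nodup_ofList xs
  have := List.Pairwise.and hle hnd
  exact this.imp (fun {a b} hab => lt_of_le_of_ne hab.1 hab.2)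

-- the two "sorted distinct days" lists coincide
lemma days_eq (bloomDay : List Int) :
    PySem.Set.ofList (PySem.List.sorted bloomDay (fun x => x) false)
      = PySem.List.sorted (PySem.Set.ofList bloomDay) (fun x => x) false := by
  refine (PySem.List.sorted_eq_of_perm_of_pairwise_lt _ _ _ ?_ ?_).symm
  · refine (List.perm_ext_iff_of_nodup (PySem.Set.nodup_ofList _) (PySem.Set.nodup_ofList _)).mpr ?_
    intro a
    rw [PySem.Set.mem_ofList, PySem.Set.mem_ofList, PySem.List.mem_sorted]
  · exact ofList_pairwise_lt _ (PySem.List.sorted_pairwise bloomDay (fun x => x))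

-- find? returns the element at findIdx (none past the end)
lemma find?_eq_getElem?_findIdx {α : Type} (p : α → Bool) :
    ∀ (l : List α), l.find? p = l[l.findIdx p]?
  | [] => rfl
  | a :: l => by
    rw [List.find?_cons, List.findIdx_cons]
    by_cases hp : p a
    · simp [hp]
    · simp only [hp, cond_false, List.getElem?_cons_succ]
      exact find?_eq_getElem?_findIdx p l

-- the binary search of Source B lands exactly on the first feasible index
lemma bsLoop_eq (bloomDay days : List Int) (m k : Int)
    (hmono : ∀ (i j : Nat) (hi : i < days.length) (hj : j < days.length), i ≤ j →
       canMake bloomDay days[i] m k = true → canMake bloomDay days[j] m k = true) :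
    ∀ (fuel : Nat) (lo hi : Int), 0 ≤ lo → hi ≤ (days.length : Int) →
      lo ≤ (days.findIdx (fun d => canMake bloomDay d m k) : Int) →
      ((days.findIdx (fun d => canMake bloomDay d m k)) : Int) ≤ hi →
      (hi - lo).toNat ≤ fuel →
      bsLoop bloomDay days m k fuel lo hi
        = (days.findIdx (fun d => canMake bloomDay d m k) : Int)
  | 0, lo, hi, h0, hlen, hlof, hfhi, hfuel => by
    simp only [bsLoop]
    omega
  | fuel + 1, lo, hi, h0, hlen, hlof, hfhi, hfuel => by
    rw [bsLoop]
    by_cases hlh : lo < hi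
    · simp only [if_pos hlh]
      have hm1 := (PySem.Int.floordiv_two_mid_bounds (le_of_lt hlh)).1
      have hm2 : PySem.Int.floordiv (lo + hi) 2 < hi := by
        rw [PySem.Int.floordiv_lt_iff_lt_mul (by omega)]; omega
      set mid := PySem.Int.floordiv (lo + hi) 2 with hmid
      have hmn : mid = ((mid.toNat : Nat) : Int) := by omega
      have hmlt : mid.toNat < days.length := by omega
      rw [PySem.List.pyGetD_eq_getElem days 0 (by omega) (by omega)]
      by_cases hp : canMake bloomDay days[mid.toNat] m k = true
      · rw [if_pos hp]
        have hfle : days.findIdx (fun d => canMake bloomDay d m k) ≤ mid.toNat := by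
          by_contra hcon
          have := List.not_of_lt_findIdx (p := fun d => canMake bloomDay d m k)
            (xs := days) (i := mid.toNat) (by omega)
          exact Bool.noConfusion (hp.symm.trans this)
        exact bsLoop_eq bloomDay days m k hmono fuel lo mid h0 (by omega) hlof (by omega) (by omega)
      · rw [if_neg hp]
        have hflt : mid.toNat < days.findIdx (fun d => canMake bloomDay d m k) := by
          by_contra hcon
          have hfl : days.findIdx (fun d => canMake bloomDay d m k) < days.length := by omega
          have hpt := List.findIdx_getElem (p := fun d => canMake bloomDay d m k)
            (xs := days) (w := hfl)
          exact hp (hmono _ mid.toNat hfl hmlt (by omega) hpt)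
        exact bsLoop_eq bloomDay days m k hmono fuel (mid + 1) hi (by omega) hlen (by omega) hfhi (by omega)
    · simp only [if_neg hlh]
      omega

theorem minDays_bruteforce_spec : Claim_equal_minDays_bruteforce := by
  intro bloomDay m k hdom hk
  unfold Pre_minDays_bruteforce at hk
  unfold Spec_minDays_bruteforce minDays_bruteforce minDays_bruteforce_alt
  by_cases hmk : m * k > (bloomDay.length : Int)
  · simp only [if_pos hmk]
  · simp only [if_neg hmk]
    set days := PySem.List.sorted (PySem.Set.ofList bloomDay) (fun x => x) false with hdays
    -- A's dedup loop produces exactly `days`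
    have hset : ((([] : List Int), (PySem.Set.empty : PySem.Set Int))
                  : List Int × PySem.Set Int)
              = ((([] : PySem.Set Int)), (([] : PySem.Set Int))) := rfl
    rw [hset, dedup_fold, ← PySem.Set.ofList_eq_foldl, days_eq]
    -- A's min fold = first feasible day of `days`
    have hpw : days.Pairwise (· < ·) := PySem.List.sorted_ofList_pairwise_lt bloomDay
    rw [foldMin_find bloomDay m k days hpw]
    -- B's binary search = first feasible index of `days`
    have hfun : (fun d => canMake bloomDay d m k)
              = (fun day => decide (getBouqNum bloomDay day k ≥ m)) :=
      funext fun d => canMake_eq bloomDay d m k hk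
    have hmono : ∀ (i j : Nat) (hi : i < days.length) (hj : j < days.length), i ≤ j →
        canMake bloomDay days[i] m k = true → canMake bloomDay days[j] m k = true := by
      intro i j hi hj hij hp
      rw [canMake_eq bloomDay _ m k hk] at hp ⊢
      have hle : days[i] ≤ days[j] := by
        rcases Nat.lt_or_ge i j with hlt | hge
        · exact le_of_lt (List.pairwise_iff_getElem.mp hpw i j hi hj hlt)
        · have : i = j := by omega
          subst this; exact le_rfl
      have := bouq_mono bloomDay k days[i] days[j] hk hle
      simp only [ge_iff_le, decide_eq_true_eq] at hp ⊢
      omega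
    set f := days.findIdx (fun d => canMake bloomDay d m k) with hf
    have hflen : f ≤ days.length := List.findIdx_le_length
    rw [bsLoop_eq bloomDay days m k hmono days.length 0 (days.length : Int)
          le_rfl le_rfl (by omega) (by omega) (by omega)]
    rw [hfun] at hf
    rw [find?_eq_getElem?_findIdx, ← hf]
    by_cases hfl : f < days.length
    · rw [if_pos (by omega), List.getElem?_eq_getElem hfl]
      rw [PySem.List.pyGetD_eq_getElem days 0 (by omega) (by omega)]
      simp only [Int.toNat_natCast]
      rfl
    · rw [if_neg (by omega), List.getElem?_eq_none (by omega)]
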